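-- pv_equiv track=rewrite | github.com/Thrigger/advent_of_code | 2021/python/d18.py | explode_first
-- ===== SOURCE A (Python) =====
-- def explode(number, offset):
--     left = number[offset]
--     j = offset - 1
--     while j >= 0:
--         if number[j] not in ["[", "]", ","]:
--             number[j] = str(int(number[j]) + int(left))
--             break
--         j -= 1
--     right = number[offset+2]
--     j = offset + 3
--     while j < len(number):
--         if number[j] not in ["[", "]", ","]:
--             number[j] = str(int(number[j]) + int(right))
--             break
--         j += 1
--     del number[offset-1:offset+3]
--     number[offset-1] = "0"
--
-- def explode_first(number):
--     dep = 0
--     max_dep = 0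
--     result = []
--     i = 0
--     while i < len(number):
--         if number[i] == "[":
--             dep += 1
--             if dep > max_dep:
--                 max_dep = dep
--                 if max_dep >= 5:
--                     explode(number, i+1)
--                     break
--         elif number[i] == "]":
--             dep -= 1
--         i+=1
--     return number
-- ===== SOURCE B (Python) =====
-- def explode_first(number):
--     # Single forward scan tracking depth and the index of the last numeric token;
--     # returns a new list when an explode happens (A mutates its argument in place).
--     depth = 0
--     last_num = None
--     for i, tok in enumerate(number):
--         if tok == "[":
--             depth += 1
--             if depth == 5:
--                 out = list(number)
--                 if last_num is not None:
--                     out[last_num] = str(int(out[last_num]) + int(out[i + 1]))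
--                 k = i + 4
--                 while k < len(out) and out[k] in ("[", "]", ","):
--                     k += 1
--                 if k < len(out):
--                     out[k] = str(int(out[k]) + int(out[i + 3]))
--                 out[i:i + 5] = ["0"]
--                 return out
--         elif tok == "]":
--             depth -= 1
--         elif tok != ",":
--             last_num = i
--     return number
-- ===== Notes on version B (the rewrite author's own statement) =====
-- stated objective: alternative
-- what changed: Replaces A's max-depth bookkeeping and backward re-scan for the left neighbour by a single forward scan that tracks the index of the last numeric token, and replaces the delete-then-assign with one slice splice; B builds a new list instead of mutating its argument (return values are equal).
import Mathlib
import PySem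

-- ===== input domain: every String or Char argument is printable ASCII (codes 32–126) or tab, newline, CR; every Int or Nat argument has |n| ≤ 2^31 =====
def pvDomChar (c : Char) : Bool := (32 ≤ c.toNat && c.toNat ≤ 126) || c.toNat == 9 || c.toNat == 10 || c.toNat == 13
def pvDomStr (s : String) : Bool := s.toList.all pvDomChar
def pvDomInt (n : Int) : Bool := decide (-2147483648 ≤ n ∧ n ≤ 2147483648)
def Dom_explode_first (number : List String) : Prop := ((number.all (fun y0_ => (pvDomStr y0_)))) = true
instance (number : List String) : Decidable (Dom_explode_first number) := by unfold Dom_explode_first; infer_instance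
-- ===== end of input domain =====

-- B replaces A's backward neighbour re-scan and max-depth bookkeeping by one forward scan that
-- tracks the last numeric index; equivalence is about the RETURN value only (A mutates its
-- argument in place, B does not).

-- ===== PORT A =====
-- token test `s not in ["[", "]", ","]` (shared literal test of both Pythons)
def pvIsBr (s : String) : Bool := s == "[" || s == "]" || s == ","

-- `number[j] = str(int(number[j]) + int(v))`; Python raises ValueError when either int() fails —
-- those inputs are excluded by Pre_, the port leaves the list unchanged there
def pvAddA (number : List String) (j : Nat) (v : String) : List String :=
  match PySem.Int.ofStr? (number.getD j ""), PySem.Int.ofStr? v with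
  | some a, some b => number.set j (PySem.Int.toStr (a + b))
  | _, _ => number

-- A's backward while loop: scan j, j-1, …, 0 for the first non-bracket token
def pvBackA (number : List String) : Nat → Option Nat
  | 0 => if pvIsBr (number.getD 0 "") then none else some 0
  | j + 1 => if pvIsBr (number.getD (j + 1) "") then pvBackA number j else some (j + 1)

-- A's forward while loop: scan j, j+1, … for the first non-bracket token
def pvFwdA (number : List String) (j : Nat) : Option Nat :=
  if h : j < number.length then
    if pvIsBr number[j] then pvFwdA number (j + 1) else some j
  else none
termination_by number.length - j

-- Python `explode(number, offset)`; out-of-range reads (Python IndexError, excluded by Pre_)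
-- are getD with a junk default
def pvExplodeA (number : List String) (offset : Nat) : List String :=
  let left := number.getD offset ""
  let n1 := match pvBackA number (offset - 1) with
    | some j => pvAddA number j left
    | none => number
  let right := n1.getD (offset + 2) ""
  let n2 := match pvFwdA n1 (offset + 3) with
    | some j => pvAddA n1 j right
    | none => n1
  -- del number[offset-1:offset+3]; number[offset-1] = "0"
  n2.take (offset - 1) ++ "0" :: n2.drop (offset + 4)

-- the main while loop of explode_first, state (i, dep, max_dep)
def pvLoopA (number : List String) (i : Nat) (dep maxdep : Int) : List String :=
  if h : i < number.length then
    if number[i] = "[" then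
      if dep + 1 > maxdep then
        if dep + 1 ≥ 5 then pvExplodeA number (i + 1)
        else pvLoopA number (i + 1) (dep + 1) (dep + 1)
      else pvLoopA number (i + 1) (dep + 1) maxdep
    else if number[i] = "]" then pvLoopA number (i + 1) (dep - 1) maxdep
    else pvLoopA number (i + 1) dep maxdep
  else number
termination_by number.length - i

def explode_first (number : List String) : List String := pvLoopA number 0 0 0

-- ===== PORT B =====
def pvAddB (number : List String) (j : Nat) (v : String) : List String :=
  match PySem.Int.ofStr? (number.getD j ""), PySem.Int.ofStr? v with
  | some a, some b => number.set j (PySem.Int.toStr (a + b))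
  | _, _ => number

-- B's forward while loop `while k < len(out) and out[k] in (…): k += 1` + `if k < len(out)`
def pvFwdB (number : List String) (j : Nat) : Option Nat :=
  if h : j < number.length then
    if pvIsBr number[j] then pvFwdB number (j + 1) else some j
  else none
termination_by number.length - j

-- the explode body of B: add left value at the tracked index, right value at the next numeric
-- token, then splice out[i:i+5] = ["0"]
def pvExplodeB (number : List String) (i : Nat) (lastNum : Option Nat) : List String :=
  let out := match lastNum with
    | some j => pvAddB number j (number.getD (i + 1) "")
    | none => number
  let out2 := match pvFwdB out (i + 4) with
    | some k => pvAddB out k (out.getD (i + 3) "")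
    | none => out
  out2.take i ++ "0" :: out2.drop (i + 5)

-- B's for loop, state (i, depth, last_num)
def pvLoopB (number : List String) (i : Nat) (depth : Int) (lastNum : Option Nat) : List String :=
  if h : i < number.length then
    if number[i] = "[" then
      if depth + 1 = 5 then pvExplodeB number i lastNum
      else pvLoopB number (i + 1) (depth + 1) lastNum
    else if number[i] = "]" then pvLoopB number (i + 1) (depth - 1) lastNum
    else if number[i] = "," then pvLoopB number (i + 1) depth lastNum
    else pvLoopB number (i + 1) depth (some i)
  else number
termination_by number.length - i

def explode_first_alt (number : List String) : List String := pvLoopB number 0 0 none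

-- ===== PRECONDITION & SPEC =====
abbrev pvNum (s : String) : Prop := pvIsBr s = false

-- bracket depth of the first k tokens
def pvDepth (number : List String) (k : Nat) : Int :=
  ((number.take k).count "[" : Int) - ((number.take k).count "]" : Int)

-- i is the index at which A explodes: a "[" where the depth first reaches 5
abbrev pvTrig (number : List String) (i : Nat) : Prop :=
  number.getD i "" = "[" ∧ pvDepth number (i + 1) = 5 ∧ ∀ k ∈ List.range (i + 1), pvDepth number k < 5

-- Pre_ excludes exactly the inputs on which the Python A raises: at the explode index the pair
-- must fit inside the list (else IndexError) and the pair values / the numeric neighbours that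
-- get converted must all be int()-parseable (else ValueError).
def Pre_explode_first (number : List String) : Prop :=
  ∀ i ∈ List.range number.length, pvTrig number i →
    i + 4 < number.length ∧
    (∀ j ∈ List.range (i + 1),
      (pvNum (number.getD j "") ∧ ∀ k ∈ List.range (i + 1), j < k → ¬ pvNum (number.getD k "")) →
      (PySem.Int.ofStr? (number.getD j "")).isSome ∧ (PySem.Int.ofStr? (number.getD (i + 1) "")).isSome) ∧
    (∀ j ∈ List.range number.length,
      (i + 4 ≤ j ∧ pvNum (number.getD j "") ∧ ∀ k ∈ List.range j, i + 4 ≤ k → ¬ pvNum (number.getD k "")) →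
      (PySem.Int.ofStr? (number.getD j "")).isSome ∧ (PySem.Int.ofStr? (number.getD (i + 3) "")).isSome)

instance (number : List String) : Decidable (Pre_explode_first number) := by
  unfold Pre_explode_first; infer_instance

def pvWitness_explode_first : List String :=
  ["[", "[", "[", "[", "[", "9", ",", "8", "]", ",", "1", "]", ",", "2", "]", ",", "3", "]", ",", "4", "]"]

def Spec_explode_first (number : List String) (out : List String) : Prop := out = explode_first_alt number
instance (number : List String) (out : List String) : Decidable (Spec_explode_first number out) := by unfold Spec_explode_first; infer_instance

-- ===== CLAIM (what is proved, stated in full; the proofs are below) =====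
def Claim_equal_explode_first : Prop := ∀ (number : List String), Dom_explode_first number → Pre_explode_first number → Spec_explode_first number (explode_first number)

-- ===== LEMMAS AND PROOFS =====

theorem pvAdd_eq : pvAddA = pvAddB := rfl

theorem pvFwd_eq_aux (xs : List String) (n : Nat) : ∀ (j : Nat), xs.length ≤ j + n →
    pvFwdA xs j = pvFwdB xs j := by
  induction n with
  | zero =>
    intro j hj
    rw [pvFwdA, pvFwdB]
    have h : ¬ j < xs.length := by omega
    simp [h]
  | succ n ih =>
    intro j hj
    rw [pvFwdA, pvFwdB]
    by_cases h : j < xs.length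
    · simp only [dif_pos h]
      by_cases hb : pvIsBr xs[j] = true
      · simp only [if_pos hb]; exact ih (j + 1) (by omega)
      · simp [hb]
    · simp [h]

theorem pvFwd_eq (xs : List String) (j : Nat) : pvFwdA xs j = pvFwdB xs j :=
  pvFwd_eq_aux xs xs.length j (by omega)

-- the spec of B's tracked last numeric index, in terms of A's backward scan
def pvBackSpec (number : List String) : Nat → Option Nat
  | 0 => none
  | j + 1 => pvBackA number j

theorem pvBackA_unfold (number : List String) (i : Nat) :
    pvBackA number i = if pvIsBr (number.getD i "") then pvBackSpec number i else some i := by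
  cases i <;> simp [pvBackA, pvBackSpec]

theorem pvExplode_eq (number : List String) (i : Nat) (lastNum : Option Nat)
    (hb : pvBackA number i = lastNum) :
    pvExplodeA number (i + 1) = pvExplodeB number i lastNum := by
  unfold pvExplodeA pvExplodeB
  simp only [Nat.add_sub_cancel]
  rw [hb, pvAdd_eq, pvFwd_eq]

theorem pvLoop_eq (number : List String) (n : Nat) :
    ∀ (i : Nat) (dep maxdep : Int) (lastNum : Option Nat),
    number.length ≤ i + n → dep ≤ maxdep → maxdep ≤ 4 →
    lastNum = pvBackSpec number i →
    pvLoopA number i dep maxdep = pvLoopB number i dep lastNum := by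
  induction n with
  | zero =>
    intro i dep maxdep lastNum hlen h1 h2 h3
    rw [pvLoopA, pvLoopB]
    have h : ¬ i < number.length := by omega
    simp [h]
  | succ n ih =>
    intro i dep maxdep lastNum hlen h1 h2 h3
    rw [pvLoopA, pvLoopB]
    by_cases h : i < number.length
    · simp only [dif_pos h]
      have hget : number.getD i "" = number[i] := List.getD_eq_getElem number "" h
      by_cases hbr : number[i] = "["
      · simp only [if_pos hbr]
        have hskip : pvIsBr (number.getD i "") = true := by
          rw [hget, hbr]; rfl
        have hnext : pvBackSpec number (i + 1) = lastNum := by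
          show pvBackA number i = lastNum
          rw [pvBackA_unfold, if_pos hskip, h3]
        by_cases h5 : dep + 1 = 5
        · have hgt : dep + 1 > maxdep := by omega
          have hge : dep + 1 ≥ 5 := by omega
          simp only [if_pos hgt, if_pos hge, if_pos h5]
          exact pvExplode_eq number i lastNum (by rw [pvBackA_unfold, if_pos hskip, h3])
        · simp only [if_neg h5]
          by_cases hgt : dep + 1 > maxdep
          · have hge : ¬ dep + 1 ≥ 5 := by omega
            simp only [if_pos hgt, if_neg hge]
            exact ih (i + 1) (dep + 1) (dep + 1) lastNum (by omega) le_rfl (by omega) hnext.symm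
          · simp only [if_neg hgt]
            exact ih (i + 1) (dep + 1) maxdep lastNum (by omega) (by omega) h2 hnext.symm
      · simp only [if_neg hbr]
        by_cases hcl : number[i] = "]"
        · have hskip : pvIsBr (number.getD i "") = true := by rw [hget, hcl]; rfl
          have hnext : pvBackSpec number (i + 1) = lastNum := by
            show pvBackA number i = lastNum
            rw [pvBackA_unfold, if_pos hskip, h3]
          simp only [if_pos hcl]
          exact ih (i + 1) (dep - 1) maxdep lastNum (by omega) (by omega) h2 hnext.symm
        · simp only [if_neg hcl]
          by_cases hcm : number[i] = ","
          · have hskip : pvIsBr (number.getD i "") = true := by rw [hget, hcm]; rfl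
            have hnext : pvBackSpec number (i + 1) = lastNum := by
              show pvBackA number i = lastNum
              rw [pvBackA_unfold, if_pos hskip, h3]
            simp only [if_pos hcm]
            exact ih (i + 1) dep maxdep lastNum (by omega) h1 h2 hnext.symm
          · have hskip : pvIsBr (number.getD i "") = false := by
              rw [hget]
              simp [pvIsBr, hbr, hcl, hcm]
            have hnext : pvBackSpec number (i + 1) = some i := by
              show pvBackA number i = some i
              rw [pvBackA_unfold, if_neg (by rw [hskip]; simp)]
            simp only [if_neg hcm]
            exact ih (i + 1) dep maxdep (some i) (by omega) h1 h2 hnext.symm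
    · simp [h]

-- ===== VERDICT (by name: the statement is the Claim_ definition above) =====
theorem explode_first_spec : Claim_equal_explode_first := by
  intro number _ _
  show explode_first number = explode_first_alt number
  exact pvLoop_eq number number.length 0 0 0 none (by omega) le_rfl (by omega) rfl
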